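-- pv_equiv track=rewrite | github.com/BlaC-t/CMPUT-331 | A8/a8.py | keyScore
-- ===== SOURCE A (Python) =====
-- def decryptVigenere(ciphertext, key):
--     # This function takes in a vigenere ciphertext and it's key as the parameters
--     # The decrypted message will be returned
--
--     decryption = ""
--
--     # creating key stream
--     if len(key) < len(ciphertext):
--         for i in range(len(ciphertext) - len(key)):
--             key += key[i % len(key)]
--
--     for i in range(len(ciphertext)):
--         x = (ord(ciphertext[i]) - ord(key[i]) + 26) % 26
--         x += ord('A')
--         decryption += chr(x)
--
--     return decryption
--
-- def keyScore(key:str, ciphertext: str, freq: dict, n: int):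
--     deMsg = decryptVigenere(ciphertext, key)
--
--     # find all n gram in the string
--     nGramList = []
--     for i in range(len(deMsg)):
--         sub = deMsg[i : i + n]
--         if len(sub) == n:
--             nGramList.append(sub)
--
--     score = 0
--
--     # recored all appeared substring to avoid repitition
--     appearedList = []
--     for i in nGramList:
--         if i not in appearedList:
--             c = nGramList.count(i)
--             if i in freq:
--                 f = freq[i]
--             else:
--                 f = 0
--
--             score += c * f
--             appearedList.append(i)
--         else:
--             continue
--
--     return score
-- ===== SOURCE B (Python) =====
-- def decryptVigenere(ciphertext, key):
--     decryption = ""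
--     if len(key) < len(ciphertext):
--         for i in range(len(ciphertext) - len(key)):
--             key += key[i % len(key)]
--     for i in range(len(ciphertext)):
--         x = (ord(ciphertext[i]) - ord(key[i]) + 26) % 26
--         x += ord('A')
--         decryption += chr(x)
--     return decryption
--
-- def keyScore(key: str, ciphertext: str, freq: dict, n: int):
--     # Single pass over the decrypted text: add the frequency of the n-gram
--     # starting at each position directly; no gram list, dedup list or .count.
--     deMsg = decryptVigenere(ciphertext, key)
--     score = 0
--     for i in range(len(deMsg)):
--         g = deMsg[i:i + n]
--         if len(g) == n:
--             score += freq.get(g, 0)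
--     return score
-- ===== Notes on version B (the rewrite author's own statement) =====
-- stated objective: faster
-- what changed: B drops A's nGramList/appearedList/.count machinery and scores in one pass over the decrypted text, adding freq.get(gram, 0) for each full-length n-gram directly.
import Mathlib
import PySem

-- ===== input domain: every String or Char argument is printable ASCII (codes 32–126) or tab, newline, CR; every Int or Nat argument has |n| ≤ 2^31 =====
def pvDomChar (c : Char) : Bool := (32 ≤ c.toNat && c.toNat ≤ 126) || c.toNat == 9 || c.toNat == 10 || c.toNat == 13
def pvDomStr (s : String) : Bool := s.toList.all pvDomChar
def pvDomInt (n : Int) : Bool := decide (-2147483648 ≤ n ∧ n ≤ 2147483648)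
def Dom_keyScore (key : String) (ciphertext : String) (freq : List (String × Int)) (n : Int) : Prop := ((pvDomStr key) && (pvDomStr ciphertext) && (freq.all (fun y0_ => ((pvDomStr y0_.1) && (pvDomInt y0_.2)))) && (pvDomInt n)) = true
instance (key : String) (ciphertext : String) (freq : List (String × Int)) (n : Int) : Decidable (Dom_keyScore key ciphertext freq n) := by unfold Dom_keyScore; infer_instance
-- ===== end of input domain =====

-- B replaces A's gram-list / dedup-list / .count scoring by one pass over the decrypted
-- text that adds each n-gram's frequency directly (objective: faster by a clear mechanism).

-- ===== PORT A =====
-- helper decryptVigenere, shared verbatim by both ports (B's Python contains the same helper)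
def pvExtendKey (key : List Char) (ctLen : Nat) : List Char :=
  if key.length < ctLen then
    (List.range (ctLen - key.length)).foldl (fun k i => k ++ [k.getD (i % k.length) 'A']) key
  else key

def pvDecrypt (ciphertext key : List Char) : List Char :=
  let key' := pvExtendKey key ciphertext.length
  (List.range ciphertext.length).foldl
    (fun dec i =>
      dec ++ [Char.ofNat ((PySem.Int.mod (((ciphertext.getD i 'A').toNat : Int)
        - ((key'.getD i 'A').toNat : Int) + 26) 26).toNat + 65)]) []

def keyScore (key : String) (ciphertext : String) (freq : List (String × Int)) (n : Int) : Int :=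
  let deMsg := pvDecrypt ciphertext.toList key.toList
  let nGramList := (List.range deMsg.length).foldl (fun acc (i : Nat) =>
      let sub := PySem.List.slice deMsg (some (i : Int)) (some ((i : Int) + n))
      if ((sub.length : Int) = n) then acc ++ [sub] else acc) []
  (nGramList.foldl (fun (st : List (List Char) × Int) g =>
      if g ∈ st.1 then st
      else
        let c : Int := nGramList.count g
        let f : Int := match PySem.Dict.get? (PySem.Dict.ofList freq) (String.ofList g) with
          | some v => v
          | none => 0
        (st.1 ++ [g], st.2 + c * f)) ([], 0)).2

-- ===== PORT B =====
def keyScore_alt (key : String) (ciphertext : String) (freq : List (String × Int)) (n : Int) : Int :=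
  let deMsg := pvDecrypt ciphertext.toList key.toList
  (List.range deMsg.length).foldl (fun score (i : Nat) =>
      let g := PySem.List.slice deMsg (some (i : Int)) (some ((i : Int) + n))
      if ((g.length : Int) = n) then score + PySem.Dict.getD (PySem.Dict.ofList freq) (String.ofList g) 0
      else score) 0

-- ===== PRECONDITION & SPEC =====
-- A (and B) raise ZeroDivisionError/IndexError when key is "" and ciphertext is not; excluded.
def Pre_keyScore (key : String) (ciphertext : String) (freq : List (String × Int)) (n : Int) : Prop :=
  key ≠ "" ∨ ciphertext = ""
instance (key : String) (ciphertext : String) (freq : List (String × Int)) (n : Int) : Decidable (Pre_keyScore key ciphertext freq n) := by unfold Pre_keyScore; infer_instance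
def pvWitness_keyScore : String × String × (List (String × Int)) × Int := ("AB", "HELLO", [("HE", 3)], 2)

def Spec_keyScore (key : String) (ciphertext : String) (freq : List (String × Int)) (n : Int) (out : Int) : Prop := out = keyScore_alt key ciphertext freq n
instance (key : String) (ciphertext : String) (freq : List (String × Int)) (n : Int) (out : Int) : Decidable (Spec_keyScore key ciphertext freq n out) := by unfold Spec_keyScore; infer_instance

-- ===== CLAIM (what is proved, stated in full; the proofs are below) =====
def Claim_equal_keyScore : Prop := ∀ (key : String) (ciphertext : String) (freq : List (String × Int)) (n : Int), Dom_keyScore key ciphertext freq n → Pre_keyScore key ciphertext freq n → Spec_keyScore key ciphertext freq n (keyScore key ciphertext freq n)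

-- ===== LEMMAS AND PROOFS =====

-- A's dedup-and-count loop: its score is the sum, over distinct grams not yet seen,
-- of (count in the full gram list) · (frequency of the gram).
lemma loopA_sum (freq : List (String × Int)) (full : List (List Char)) :
    ∀ (L ap : List (List Char)) (s : Int),
    (L.foldl (fun (st : List (List Char) × Int) g =>
        if g ∈ st.1 then st
        else (st.1 ++ [g], st.2 + (full.count g : Int) *
          (match PySem.Dict.get? (PySem.Dict.ofList freq) (String.ofList g) with
           | some v => v | none => 0))) (ap, s)).2
      = s + ∑ g ∈ L.toFinset \ ap.toFinset, (full.count g : Int) *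
          ((PySem.Dict.get? (PySem.Dict.ofList freq) (String.ofList g)).getD 0) := by
  intro L
  induction L with
  | nil => intro ap s; simp
  | cons a L ih =>
    intro ap s
    by_cases ha : a ∈ ap
    · simp only [List.foldl_cons, if_pos ha, ih]
      congr 1
      rw [List.toFinset_cons, Finset.insert_sdiff_of_mem _ (List.mem_toFinset.mpr ha)]
    · simp only [List.foldl_cons, if_neg ha, ih]
      have hap : (ap ++ [a]).toFinset = insert a ap.toFinset := by
        simp [List.toFinset_append]
      rw [hap, Finset.sdiff_insert, List.toFinset_cons]
      have hins : insert a L.toFinset \ ap.toFinset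
          = insert a (L.toFinset \ ap.toFinset) := by
        ext x
        simp only [Finset.mem_sdiff, Finset.mem_insert, List.mem_toFinset]
        constructor
        · rintro ⟨hx | hx, hax⟩
          · exact Or.inl hx
          · exact Or.inr ⟨hx, hax⟩
        · rintro (rfl | ⟨hx, hax⟩)
          · exact ⟨Or.inl rfl, by simpa using ha⟩
          · exact ⟨Or.inr hx, hax⟩
      rw [hins]
      set T := L.toFinset \ ap.toFinset with hT
      have hT' : insert a T = insert a (T.erase a) := by
        ext x; by_cases hxa : x = a <;> simp [hxa]
      rw [hT', Finset.sum_insert (Finset.notMem_erase a _)]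
      have hm : (match PySem.Dict.get? (PySem.Dict.ofList freq) (String.ofList a) with
          | some v => v | none => (0 : Int))
          = (PySem.Dict.get? (PySem.Dict.ofList freq) (String.ofList a)).getD 0 := by
        cases PySem.Dict.get? (PySem.Dict.ofList freq) (String.ofList a) <;> rfl
      rw [hm]; ring

-- sum of a 0-padded map equals sum over the filtered list
lemma sum_map_ite_filter {α : Type} (l : List α) (p : α → Prop) [DecidablePred p] (h : α → Int) :
    (l.map (fun x => if p x then h x else 0)).sum = ((l.filter (fun x => decide (p x))).map h).sum := by
  induction l with
  | nil => simp
  | cons a l ih =>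
    by_cases hp : p a <;> simp [hp, ih]

-- ===== VERDICT (by name: the statement is the Claim_ definition above) =====
theorem keyScore_spec : Claim_equal_keyScore := by
  intro key ct freq n _ _
  unfold Spec_keyScore keyScore keyScore_alt
  dsimp only
  set m := pvDecrypt ct.toList key.toList with hm
  set g : Nat → List Char := fun i => PySem.List.slice m (some (i : Int)) (some ((i : Int) + n)) with hg
  set f : List Char → Int :=
    fun s => (PySem.Dict.get? (PySem.Dict.ofList freq) (String.ofList s)).getD 0 with hf
  -- rewrite A's gram-collecting fold as map + filter
  have hfold : (List.range m.length).foldl (fun acc (i : Nat) =>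
      if (((g i).length : Int) = n) then acc ++ [g i] else acc) ([] : List (List Char))
      = ((List.range m.length).filter (fun i => decide (((g i).length : Int) = n))).map g := by
    have := PySem.List.foldl_append_if (fun i => decide (((g i).length : Int) = n)) g
      (List.range m.length) []
    simpa using this
  set idxs := (List.range m.length).filter (fun i => decide (((g i).length : Int) = n)) with hidxs
  rw [hfold]
  -- A's side
  have hA : ((idxs.map g).foldl (fun (st : List (List Char) × Int) s =>
        if s ∈ st.1 then st
        else (st.1 ++ [s], st.2 + ((idxs.map g).count s : Int) *
          (match PySem.Dict.get? (PySem.Dict.ofList freq) (String.ofList s) with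
           | some v => v | none => 0))) ([], 0)).2
      = ((idxs.map g).map f).sum := by
    rw [loopA_sum freq (idxs.map g) (idxs.map g) [] 0]
    rw [Finset.sum_list_map_count (idxs.map g) f]
    simp [hf, mul_comm]
    apply Finset.sum_congr rfl
    intro x _
    congr 1
    rw [Nat.cast_inj]
    simp only [List.count_eq_countP]
    exact List.countP_congr (fun a _ => by simp)
  rw [hA]
  -- B's side
  have hstep : (fun (score : Int) (i : Nat) =>
      if (((g i).length : Int) = n) then score + PySem.Dict.getD (PySem.Dict.ofList freq) (String.ofList (g i)) 0
      else score)
      = (fun (score : Int) i => score +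
          (if (((g i).length : Int) = n) then f (g i) else 0)) := by
    funext score i
    by_cases hp : ((g i).length : Int) = n <;>
      simp [hp, hf, PySem.Dict.getD]
  rw [hstep, PySem.List.foldl_add]
  rw [sum_map_ite_filter (List.range m.length) (fun i => ((g i).length : Int) = n) (fun i => f (g i))]
  simp [hidxs, List.map_map]
  rfl
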